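-- pv_equiv track=rewrite | github.com/Ing-Josef-Klotzner/python | 2017/hackerrank/arrayPairs.py | solve_p
-- ===== SOURCE A (Python) =====
-- from collections import deque   #, defaultdict
-- from copy import deepcopy
--
-- def solve_p (a):  # with pre-computed init lists for j
--     res = 0   # simple, faster with windowing max
--     q = deque ([0])   # slower than solve ()
--     qL = [0]   # initial lists of deques for each j
--     for j in range (1, len (a)):
--         while q and a [j] >= a [q [-1]]: q.pop ()
--         q.append (j)
--         qL.append (deepcopy (q))
--     for j in range (1, len (a)):
--         for i in range (j):
--             #print (j, end = " ")
--             mx = a [qL [j] [0]]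
--             while qL [j] and qL [j] [0] <= i: qL [j].popleft ()
--             if (a [i] * a [j] <= mx): res += 1
--     return res
-- ===== SOURCE B (Python) =====
-- def solve_p(a):
--     # Count pairs i<j with a[i]*a[j] <= max(a[i..j]), via a running window
--     # maximum per left endpoint -- no deques, no per-index stack copies.
--     res = 0
--     n = len(a)
--     for i in range(n):
--         m = a[i]
--         for j in range(i + 1, n):
--             if a[j] > m:
--                 m = a[j]
--             if a[i] * a[j] <= m:
--                 res += 1
--     return res
-- ===== Notes on version B (the rewrite author's own statement) =====
-- stated objective: simpler
-- what changed: A precomputes and deep-copies a monotonic index deque per right endpoint and consumes the copies in a second pass; B drops all of that and counts pairs in one nested loop per left endpoint, maintaining the window maximum as a single running value.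
import Mathlib
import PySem

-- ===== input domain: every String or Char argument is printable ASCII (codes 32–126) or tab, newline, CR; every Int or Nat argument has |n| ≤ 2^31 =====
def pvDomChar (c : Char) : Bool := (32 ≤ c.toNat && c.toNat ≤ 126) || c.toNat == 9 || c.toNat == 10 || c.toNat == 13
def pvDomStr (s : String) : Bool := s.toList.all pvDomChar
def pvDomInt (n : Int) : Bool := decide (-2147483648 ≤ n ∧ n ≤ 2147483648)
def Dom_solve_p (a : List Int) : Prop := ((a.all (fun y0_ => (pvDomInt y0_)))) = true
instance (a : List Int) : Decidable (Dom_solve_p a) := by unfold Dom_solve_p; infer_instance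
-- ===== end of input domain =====

-- B replaces A's per-index deque snapshots (deepcopy of a monotonic stack for every j)
-- by a plain running window maximum per left endpoint: same pair count, simpler code.


-- ===== PORT A =====
-- The deque q is kept top-first (head = q[-1]); the snapshots qL[j] are stored
-- bottom-first (head = q[0]), i.e. `q.reverse`, matching how phase 2 reads them.
-- Every index access a[..] is in range, so `a.getD _ 0` is exact.
-- Python's qL[0] is the (never read) int 0; the port stores the equally unread [0].
def solve_p (a : List Int) : Int :=
  let n := a.length
  let st := (List.range' 1 (n - 1)).foldl
    (fun (st : List Nat × List (List Nat)) j =>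
      let q := st.1.dropWhile (fun m => a.getD m 0 ≤ a.getD j 0)  -- while q and a[j] >= a[q[-1]]: q.pop()
      let q := j :: q                                             -- q.append(j)
      (q, st.2 ++ [q.reverse]))                                   -- qL.append(deepcopy(q))
    ([0], [[0]])
  let qL := st.2
  (List.range' 1 (n - 1)).foldl
    (fun res j =>
      ((List.range j).foldl
        (fun (st : Int × List Nat) i =>
          let mx := a.getD (st.2.headD 0) 0                       -- mx = a[qL[j][0]]
          let dq := st.2.dropWhile (fun m => m ≤ i)               -- while qL[j] and qL[j][0] <= i: popleft()
          (if a.getD i 0 * a.getD j 0 ≤ mx then st.1 + 1 else st.1, dq))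
        (res, qL.getD j [])).1)
    0

-- ===== PORT B =====
def solve_p_alt (a : List Int) : Int :=
  let n := a.length
  (List.range n).foldl
    (fun res i =>
      ((List.range' (i + 1) (n - (i + 1))).foldl
        (fun (st : Int × Int) j =>
          let m := if a.getD j 0 > st.2 then a.getD j 0 else st.2  -- if a[j] > m: m = a[j]
          (if a.getD i 0 * a.getD j 0 ≤ m then st.1 + 1 else st.1, m))
        (res, a.getD i 0)).1)
    0

-- ===== PRECONDITION & SPEC =====
def Spec_solve_p (a : List Int) (out : Int) : Prop := out = solve_p_alt a
instance (a : List Int) (out : Int) : Decidable (Spec_solve_p a out) := by unfold Spec_solve_p; infer_instance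

-- ===== CLAIM (what is proved, stated in full; the proofs are below) =====
def Claim_equal_solve_p : Prop := ∀ (a : List Int), Dom_solve_p a → Spec_solve_p a (solve_p a)

-- ===== LEMMAS AND PROOFS =====

-- max of a[i..j] (for i ≤ j), written as a left fold mirroring a running maximum
def amax (a : List Int) (i j : Nat) : Int :=
  (List.range' (i + 1) (j - i)).foldl (fun m k => max m (a.getD k 0)) (a.getD i 0)

-- indicator of a counted pair (i, j)
def cind (a : List Int) (i j : Nat) : Int :=
  if a.getD i 0 * a.getD j 0 ≤ amax a i j then 1 else 0

-- the monotonic stack after phase-1 iteration j (top-first, = Python's q reversed)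
def stk (a : List Int) : Nat → List Nat
  | 0 => [0]
  | j + 1 => (j + 1) :: (stk a j).dropWhile (fun m => a.getD m 0 ≤ a.getD (j + 1) 0)

theorem amax_self (a : List Int) (i : Nat) : amax a i i = a.getD i 0 := by
  simp [amax]

theorem amax_succ (a : List Int) (i j : Nat) (h : i ≤ j) :
    amax a i (j + 1) = max (amax a i j) (a.getD (j + 1) 0) := by
  unfold amax
  have h1 : j + 1 - i = (j - i) + 1 := by omega
  have h2 : i + 1 + 1 * (j - i) = j + 1 := by omega
  rw [h1, List.range'_concat, List.foldl_append, h2]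
  simp

theorem stk_le (a : List Int) (j : Nat) : ∀ m ∈ stk a j, m ≤ j := by
  induction j with
  | zero => simp [stk]
  | succ n ih =>
    intro m hm
    simp only [stk, List.mem_cons] at hm
    rcases hm with rfl | hm
    · omega
    · exact le_trans (ih m ((List.dropWhile_sublist _).mem hm)) (by omega)

theorem stk_dec (a : List Int) (j : Nat) : (stk a j).Pairwise (· > ·) := by
  induction j with
  | zero => simp [stk]
  | succ n ih =>
    simp only [stk]
    refine List.Pairwise.cons ?_ (ih.sublist (List.dropWhile_sublist _))
    intro m hm
    exact Nat.lt_succ_of_le (stk_le a n m ((List.dropWhile_sublist _).mem hm))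

-- every element surviving a dropWhile over a value-increasing list beats the cut value
theorem dropWhile_gt (f : Nat → Int) (c : Int) : ∀ (l : List Nat),
    l.Pairwise (fun x y => f x < f y) →
    ∀ m ∈ l.dropWhile (fun m => f m ≤ c), c < f m := by
  intro l
  induction l with
  | nil => simp
  | cons h t ih =>
    intro hp m hm
    rw [List.dropWhile_cons] at hm
    by_cases hc : f h ≤ c
    · simp [hc] at hm
      exact ih hp.tail m hm
    · simp [hc] at hm
      rcases hm with rfl | hm
      · omega
      · have := (List.pairwise_cons.mp hp).1 m hm
        omega

theorem stk_vals (a : List Int) (j : Nat) :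
    (stk a j).Pairwise (fun x y => a.getD x 0 < a.getD y 0) := by
  induction j with
  | zero => simp [stk]
  | succ n ih =>
    simp only [stk]
    refine List.Pairwise.cons ?_ (ih.sublist (List.dropWhile_sublist _))
    exact dropWhile_gt (fun m => a.getD m 0) (a.getD (n+1) 0) (stk a n) ih

theorem getLastD_mem {α} (l : List α) (d : α) (h : l ≠ []) : l.getLastD d ∈ l := by
  rw [List.getLastD_eq_getLast?, List.getLast?_eq_some_getLast h]
  simp [List.getLast_mem h]

-- the key invariant: the last stack entry with index ≥ i carries the value max a[i..j]
theorem stk_max (a : List Int) (j : Nat) : ∀ i, i ≤ j →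
    ((stk a j).filter (fun m => i ≤ m)) ≠ [] ∧
    a.getD (((stk a j).filter (fun m => i ≤ m)).getLastD 0) 0 = amax a i j := by
  induction j with
  | zero =>
    intro i hi
    have : i = 0 := by omega
    subst this
    simp [stk, amax]
  | succ n ih =>
    intro i hi
    set p : Nat → Bool := fun m => a.getD m 0 ≤ a.getD (n + 1) 0 with hp
    have hstk : stk a (n+1) = (n+1) :: (stk a n).dropWhile p := rfl
    set D := (stk a n).dropWhile p with hD
    have hfil : (stk a (n+1)).filter (fun m => i ≤ m)
        = (n+1) :: D.filter (fun m => i ≤ m) := by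
      rw [hstk, List.filter_cons]
      simp [hi]
    rcases Nat.lt_or_ge n i with hgt | hle
    · -- i = n+1 : every element of D is ≤ n < i, so the filter of D is empty
      have hieq : i = n + 1 := by omega
      have hDf : D.filter (fun m => i ≤ m) = [] := by
        rw [List.filter_eq_nil_iff]
        intro m hm
        have := stk_le a n m ((List.dropWhile_sublist _).mem hm)
        simp; omega
      refine ⟨by rw [hfil]; simp, ?_⟩
      rw [hfil, hDf, hieq]
      simp [amax_self, List.getD]
    · -- i ≤ n
      obtain ⟨hne, hval⟩ := ih i hle
      have hsplit : (stk a n).filter (fun m => i ≤ m)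
          = ((stk a n).takeWhile p).filter (fun m => i ≤ m) ++ D.filter (fun m => i ≤ m) := by
        conv_lhs => rw [← List.takeWhile_append_dropWhile (p := p) (l := stk a n)]
        rw [List.filter_append]
      by_cases hDf : D.filter (fun m => i ≤ m) = []
      · -- the surviving max index was cut: max a[i..n] ≤ a[n+1]
        have hFj : (stk a n).filter (fun m => i ≤ m)
            = ((stk a n).takeWhile p).filter (fun m => i ≤ m) := by
          rw [hsplit, hDf, List.append_nil]
        have h1 := getLastD_mem ((stk a n).filter (fun m => i ≤ m)) 0 hne
        rw [hFj] at h1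
        have h2 := List.mem_of_mem_filter h1
        have hple : a.getD (((stk a n).filter (fun m => i ≤ m)).getLastD 0) 0 ≤ a.getD (n+1) 0 := by
          rw [hFj]
          simpa [hp] using List.mem_takeWhile_imp h2
        refine ⟨by rw [hfil]; simp, ?_⟩
        rw [hfil, List.getLastD_cons, hDf]
        simp only [List.getLastD]
        rw [amax_succ a i n hle]
        omega
      · -- the surviving max index is still on the stack and its value beats a[n+1]
        have hlast : ((stk a n).filter (fun m => i ≤ m)).getLastD 0
            = (D.filter (fun m => i ≤ m)).getLastD 0 := by
          have hsome := List.getLast?_eq_some_getLast hDf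
          rw [hsplit, List.getLastD_eq_getLast?, List.getLast?_append, hsome,
              List.getLastD_eq_getLast?, hsome]
          rfl
        have hmemD : (D.filter (fun m => i ≤ m)).getLastD 0 ∈ D :=
          List.mem_of_mem_filter (getLastD_mem _ 0 hDf)
        have hbig : a.getD (n+1) 0 < a.getD ((D.filter (fun m => i ≤ m)).getLastD 0) 0 :=
          dropWhile_gt (fun m => a.getD m 0) (a.getD (n+1) 0) (stk a n) (stk_vals a n) _ hmemD
        have hgl : (D.filter (fun m => i ≤ m)).getLastD (n+1)
            = (D.filter (fun m => i ≤ m)).getLastD 0 := by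
          rw [List.getLastD_eq_getLast?, List.getLastD_eq_getLast?,
              List.getLast?_eq_some_getLast hDf]
          rfl
        refine ⟨by rw [hfil]; simp, ?_⟩
        rw [hfil, List.getLastD_cons, hgl, ← hlast, hval, amax_succ a i n hle]
        rw [hlast] at hval
        omega

theorem getD_map_range' {α} (f : Nat → α) (d : α) (k j : Nat) (h : j < k) :
    ((List.range k).map f).getD j d = f j := by
  rw [List.getD_eq_getElem?_getD]
  simp [h]

theorem dropWhile_le_eq_filter (i : Nat) : ∀ l : List Nat, l.Pairwise (· < ·) →
    l.dropWhile (fun m => m ≤ i) = l.filter (fun m => i + 1 ≤ m) := by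
  intro l
  induction l with
  | nil => simp
  | cons h t ih =>
    intro hp
    rw [List.dropWhile_cons, List.filter_cons]
    by_cases hc : h ≤ i
    · simp only [hc]
      have : ¬ (i + 1 ≤ h) := by omega
      simp [this, ih hp.tail]
    · have h1 : i + 1 ≤ h := by omega
      have ht : List.filter (fun m => decide (i + 1 ≤ m)) t = t := by
        rw [List.filter_eq_self]
        intro x hx
        have := (List.pairwise_cons.mp hp).1 x hx
        simp; omega
      rw [if_neg (by simpa using hc), if_pos (by simpa using h1), ht]

theorem filter_succ_filter (i : Nat) (l : List Nat) :
    (l.filter (fun m => i ≤ m)).filter (fun m => i + 1 ≤ m)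
      = l.filter (fun m => i + 1 ≤ m) := by
  rw [List.filter_filter]
  apply List.filter_congr
  intro x _
  by_cases h : i + 1 ≤ x
  · have : i ≤ x := by omega
    simp [h, this]
  · simp [h]

-- generic: a foldl that adds g i at each step is a sum
theorem foldl_eq_sum (g : Nat → Int) (step : Int → Nat → Int) :
    ∀ (L : List Nat), (∀ r i, i ∈ L → step r i = r + g i) → ∀ (r : Int),
    L.foldl step r = r + (L.map g).sum := by
  intro L
  induction L with
  | nil => simp
  | cons h t ih =>
    intro hs r
    rw [List.foldl_cons, hs r h (by simp), List.map_cons, List.sum_cons,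
        ih (fun r i hi => hs r i (by simp [hi])) _]
    ring

theorem headD_eq_head? {α} (l : List α) (d : α) : l.headD d = l.head?.getD d := by
  cases l <;> simp

theorem rev_pairwise_lt (a : List Int) (j : Nat) :
    ((stk a j).reverse).Pairwise (· < ·) := by
  rw [List.pairwise_reverse]
  exact stk_dec a j

-- A's inner loop over i, with its persistent deque state, counts cind a i j
theorem innerA (a : List Int) (j : Nat) : ∀ i, i ≤ j → ∀ r : Int,
    (List.range i).foldl
      (fun (st : Int × List Nat) i' =>
        let mx := a.getD (st.2.headD 0) 0
        let dq := st.2.dropWhile (fun m => m ≤ i')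
        (if a.getD i' 0 * a.getD j 0 ≤ mx then st.1 + 1 else st.1, dq))
      (r, (stk a j).reverse)
    = (r + ((List.range i).map (fun i' => cind a i' j)).sum,
       ((stk a j).reverse).filter (fun m => i ≤ m)) := by
  intro i
  induction i with
  | zero =>
    intro _ r
    simp
  | succ k ih =>
    intro hk r
    rw [List.range_succ, List.foldl_append, ih (by omega) r]
    simp only [List.foldl_cons, List.foldl_nil]
    have hpf : (((stk a j).reverse).filter (fun m => decide (k ≤ m))).Pairwise (· < ·) :=
      List.Pairwise.sublist List.filter_sublist (rev_pairwise_lt a j)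
    have hmx : a.getD (((((stk a j).reverse).filter (fun m => decide (k ≤ m)))).headD 0) 0
        = amax a k j := by
      rw [List.filter_reverse, headD_eq_head?, List.head?_reverse, ← List.getLastD_eq_getLast?]
      exact (stk_max a j k (by omega)).2
    have hdq : (((stk a j).reverse).filter (fun m => decide (k ≤ m))).dropWhile (fun m => m ≤ k)
        = ((stk a j).reverse).filter (fun m => decide (k + 1 ≤ m)) := by
      rw [dropWhile_le_eq_filter k _ hpf, filter_succ_filter]
    simp only [hmx, hdq]
    rw [List.map_append, List.sum_append]
    simp only [List.map_cons, List.map_nil, List.sum_cons, List.sum_nil]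
    unfold cind
    split_ifs with h
    · refine Prod.ext ?_ rfl
      simp; ring
    · refine Prod.ext ?_ rfl
      simp

theorem max_ite (x y : Int) : (if y > x then y else x) = max x y := by
  rw [max_def]; split_ifs <;> omega

-- B's inner loop keeps the running maximum of a[i..j] and counts cind a i j
theorem innerB (a : List Int) (i : Nat) : ∀ (L : Nat) (r : Int),
    (List.range' (i + 1) L).foldl
      (fun (st : Int × Int) j =>
        let m := if a.getD j 0 > st.2 then a.getD j 0 else st.2
        (if a.getD i 0 * a.getD j 0 ≤ m then st.1 + 1 else st.1, m))
      (r, a.getD i 0)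
    = (r + ((List.range' (i + 1) L).map (fun j => cind a i j)).sum, amax a i (i + L)) := by
  intro L
  induction L with
  | zero => intro r; simp [amax_self]
  | succ k ih =>
    intro r
    rw [List.range'_concat, List.foldl_append, ih r]
    simp only [List.foldl_cons, List.foldl_nil]
    have hj : i + 1 + 1 * k = i + (k + 1) := by omega
    have hm : (if a.getD (i + 1 + 1 * k) 0 > amax a i (i + k) then a.getD (i + 1 + 1 * k) 0
        else amax a i (i + k)) = amax a i (i + (k + 1)) := by
      rw [max_ite, hj]
      have h2 : i + (k + 1) = (i + k) + 1 := by omega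
      rw [h2, amax_succ a i (i + k) (by omega)]
    simp only [hm]
    rw [List.map_append, List.sum_append]
    simp only [List.map_cons, List.map_nil, List.sum_cons, List.sum_nil]
    unfold cind
    rw [hj]
    split_ifs with h
    · refine Prod.ext ?_ rfl; simp; ring
    · refine Prod.ext ?_ rfl; simp

-- phase 1 of A builds exactly the stack snapshots stk a j
theorem phase1 (a : List Int) : ∀ m : Nat,
    (List.range' 1 m).foldl
      (fun (st : List Nat × List (List Nat)) j =>
        let q := st.1.dropWhile (fun k => a.getD k 0 ≤ a.getD j 0)
        let q := j :: q
        (q, st.2 ++ [q.reverse]))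
      ([0], [[0]])
    = (stk a m, (List.range (m + 1)).map (fun j => (stk a j).reverse)) := by
  intro m
  induction m with
  | zero => simp [stk]
  | succ k ih =>
    rw [List.range'_concat, List.foldl_append, ih]
    simp only [List.foldl_cons, List.foldl_nil]
    have h1 : 1 + 1 * k = k + 1 := by omega
    rw [h1]
    have hq : (k + 1) :: (stk a k).dropWhile (fun m => a.getD m 0 ≤ a.getD (k + 1) 0)
        = stk a (k + 1) := rfl
    rw [hq, List.range_succ (n := k + 1), List.map_append]
    rfl

-- exchanging the two summation orders over the triangle i < j < t
theorem sum_swap (a : List Int) : ∀ t : Nat,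
    ((List.range t).map (fun j => ((List.range j).map (fun i => cind a i j)).sum)).sum
      = ((List.range t).map
          (fun i => ((List.range' (i + 1) (t - (i + 1))).map (fun j => cind a i j)).sum)).sum := by
  intro t
  induction t with
  | zero => simp
  | succ k ih =>
    rw [List.range_succ, List.map_append, List.sum_append, List.map_append, List.sum_append]
    have hmid : (List.range k).map
          (fun i => ((List.range' (i + 1) (k + 1 - (i + 1))).map (fun j => cind a i j)).sum)
        = (List.range k).map
          (fun i => ((List.range' (i + 1) (k - (i + 1))).map (fun j => cind a i j)).sum
            + cind a i k) := by
      apply List.map_congr_left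
      intro i hi
      have hik : i < k := List.mem_range.mp hi
      have h1 : k + 1 - (i + 1) = (k - (i + 1)) + 1 := by omega
      have h2 : i + 1 + 1 * (k - (i + 1)) = k := by omega
      rw [h1, List.range'_concat, h2, List.map_append, List.sum_append]
      simp
    rw [hmid, List.sum_map_add, ih]
    simp only [List.map_cons, List.map_nil, List.sum_cons, List.sum_nil, Nat.sub_self,
      List.range'_zero]
    ring

theorem A_eq (a : List Int) : solve_p a =
    ((List.range' 1 (a.length - 1)).map
      (fun j => ((List.range j).map (fun i => cind a i j)).sum)).sum := by
  simp only [solve_p]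
  rw [phase1 a (a.length - 1)]
  rw [foldl_eq_sum (fun j => ((List.range j).map (fun i => cind a i j)).sum) _ _ ?_ 0]
  · simp
  · intro r j hj
    have hj' := List.mem_range'_1.mp hj
    simp only []
    rw [getD_map_range' (fun j => (stk a j).reverse) [] (a.length - 1 + 1) j (by omega)]
    rw [innerA a j j le_rfl r]

theorem B_eq (a : List Int) : solve_p_alt a =
    ((List.range a.length).map
      (fun i => ((List.range' (i + 1) (a.length - (i + 1))).map (fun j => cind a i j)).sum)).sum := by
  simp only [solve_p_alt]
  rw [foldl_eq_sum
      (fun i => ((List.range' (i + 1) (a.length - (i + 1))).map (fun j => cind a i j)).sum) _ _ ?_ 0]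
  · simp
  · intro r i _
    simp only []
    rw [innerB a i (a.length - (i + 1)) r]

theorem range'_sum_eq (a : List Int) :
    ((List.range' 1 (a.length - 1)).map
      (fun j => ((List.range j).map (fun i => cind a i j)).sum)).sum
    = ((List.range a.length).map
      (fun j => ((List.range j).map (fun i => cind a i j)).sum)).sum := by
  cases h : a.length with
  | zero => simp
  | succ k =>
    rw [List.range_eq_range', List.range'_succ]
    simp only [Nat.add_sub_cancel, List.map_cons, List.sum_cons]
    simp

-- ===== VERDICT (by name: the statement is the Claim_ definition above) =====
theorem solve_p_spec : Claim_equal_solve_p := by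
  intro a _
  unfold Spec_solve_p
  rw [A_eq, B_eq, range'_sum_eq, sum_swap]
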